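-- pv_equiv track=rewrite | github.com/tOrryV/Multi-bit-arithmetic | main.py | LongShiftBitsToHigh
-- ===== SOURCE A (Python) =====
-- def LongShiftDigitsToHigh(n, l):
--     for i in range(l):
--         n.insert(0, 0)
--     return n
--
-- def LongShiftBitsToHigh(number, width_shift):
--     if width_shift <= 0 or number == [0]:
--         return number.copy()
--     remainder = width_shift % 32
--     width_shift //= 32
--     result = LongShiftDigitsToHigh(number.copy(), width_shift)
--     if remainder > 0:
--         for i in range(remainder):
--             last_bit = (result[-1] >> 31) & 1
--             for j in range(len(result) - 1, 0, -1):
--                 result[j] = ((result[j] << 1) ^ ((result[j - 1] >> 31) & 1)) & 0xFFFFFFFF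
--             result[0] = (result[0] << 1) & 0xFFFFFFFF
--             if last_bit != 0:
--                 result.append(last_bit)
--     while len(result) > 1 and result[-1] == 0:
--         result.pop()
--     return result
-- ===== SOURCE B (Python) =====
-- def LongShiftBitsToHigh(number, width_shift):
--     if width_shift <= 0:
--         return number.copy()
--     words, rem = divmod(width_shift, 32)
--     if rem == 0:
--         out = [0] * words + number
--     else:
--         out = [0] * words
--         carry = 0
--         for w in number:
--             v = ((w & 0xFFFFFFFF) << rem) + carry
--             out.append(v & 0xFFFFFFFF)
--             carry = v >> 32
--         if carry != 0:
--             out.append(carry)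
--     while len(out) > 1 and out[-1] == 0:
--         out.pop()
--     return out
-- ===== Notes on version B (the rewrite author's own statement) =====
-- stated objective: faster
-- what changed: A shifts the whole word list left one bit at a time (remainder full passes with per-word carry bits) after prepending zero words; B does a single word-wise pass combining (word mod 2^32) << rem with the carry from the previous word (word-aligned shifts just prepend zero words), then trims trailing zero words identically.
import Mathlib
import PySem

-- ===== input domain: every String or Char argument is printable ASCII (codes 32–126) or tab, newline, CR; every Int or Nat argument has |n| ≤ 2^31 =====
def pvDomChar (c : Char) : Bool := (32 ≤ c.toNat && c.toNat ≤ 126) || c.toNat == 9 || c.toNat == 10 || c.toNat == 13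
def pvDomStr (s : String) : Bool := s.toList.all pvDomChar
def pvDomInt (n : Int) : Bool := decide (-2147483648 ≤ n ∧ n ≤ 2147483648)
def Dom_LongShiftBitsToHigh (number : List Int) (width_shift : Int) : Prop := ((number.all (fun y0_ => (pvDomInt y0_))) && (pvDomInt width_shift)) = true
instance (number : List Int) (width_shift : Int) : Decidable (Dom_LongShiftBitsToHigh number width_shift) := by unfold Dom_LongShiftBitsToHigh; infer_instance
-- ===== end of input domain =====

-- B replaces A's bit-at-a-time loop (remainder passes over the whole list) by one word-wise
-- pass combining (w << r) with the carry from the previous word; equivalence of return values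
-- is proved (A mutates nothing observable: it works on number.copy()).

-- ===== PORT A =====
-- for i in range(l): n.insert(0, 0)
def LongShiftDigitsToHigh (n : List Int) (l : Int) : List Int :=
  (PySem.List.pyRange 0 l 1).foldl (fun acc _i => PySem.List.insert acc 0 0) n

-- one iteration of A's `for i in range(remainder)` body (the loop body, verbatim)
def pvShiftStepA (result : List Int) : List Int :=
  let last_bit := PySem.Int.band ((PySem.List.pyGetD result (-1) 0) >>> (31 : Nat)) 1
  let res := (PySem.List.pyRange ((PySem.List.len result) - 1) 0 (-1)).foldl
      (fun r j => PySem.List.pySetD r j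
        (PySem.Int.band
          (PySem.Int.bxor ((PySem.List.pyGetD r j 0) <<< (1 : Nat))
            (PySem.Int.band ((PySem.List.pyGetD r (j - 1) 0) >>> (31 : Nat)) 1))
          4294967295)) result
  let res := PySem.List.pySetD res 0
      (PySem.Int.band ((PySem.List.pyGetD res 0 0) <<< (1 : Nat)) 4294967295)
  if last_bit ≠ 0 then res ++ [last_bit] else res

-- while len(l) > 1 and l[-1] == 0: l.pop()   (pop() discards the last element: dropLast is exact)
def popAux : Nat → List Int → List Int
  | 0, l => l
  | fuel + 1, l =>
    if 1 < l.length ∧ PySem.List.pyGet? l (-1) = some 0 then popAux fuel l.dropLast else l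
def popTrailingZeros (l : List Int) : List Int := popAux l.length l

def LongShiftBitsToHigh (number : List Int) (width_shift : Int) : List Int :=
  if width_shift ≤ 0 ∨ number = [0] then number
  else
    let remainder := PySem.Int.mod width_shift 32
    let width_shift := PySem.Int.floordiv width_shift 32
    let result := LongShiftDigitsToHigh number width_shift
    let result := if remainder > 0 then
        (PySem.List.pyRange 0 remainder 1).foldl (fun r _i => pvShiftStepA r) result
      else result
    popTrailingZeros result

-- ===== PORT B =====
def LongShiftBitsToHigh_alt (number : List Int) (width_shift : Int) : List Int :=
  if width_shift ≤ 0 then number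
  else
    let words := PySem.Int.floordiv width_shift 32
    let rem := PySem.Int.mod width_shift 32
    let out :=
      if rem = 0 then List.replicate words.toNat 0 ++ number
      else
        let p := number.foldl
          (fun (p : List Int × Int) w =>
            let v := (PySem.Int.band w 4294967295) <<< rem.toNat + p.2
            (p.1 ++ [PySem.Int.band v 4294967295], v >>> (32 : Nat)))
          (List.replicate words.toNat 0, 0)
        if p.2 ≠ 0 then p.1 ++ [p.2] else p.1
    popTrailingZeros out

-- ===== PRECONDITION & SPEC =====
-- Pre_ excludes only number = [] with 0 < width_shift < 32: there A raises IndexError (result[-1]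
-- on the empty list); A returns on everything else admitted by Dom_.
def Pre_LongShiftBitsToHigh (number : List Int) (width_shift : Int) : Prop :=
  number ≠ [] ∨ width_shift ≤ 0 ∨ 32 ≤ width_shift
instance (number : List Int) (width_shift : Int) : Decidable (Pre_LongShiftBitsToHigh number width_shift) := by unfold Pre_LongShiftBitsToHigh; infer_instance

def pvWitness_LongShiftBitsToHigh : List Int × Int := ([3, 5], 33)

def Spec_LongShiftBitsToHigh (number : List Int) (width_shift : Int) (out : List Int) : Prop := out = LongShiftBitsToHigh_alt number width_shift
instance (number : List Int) (width_shift : Int) (out : List Int) : Decidable (Spec_LongShiftBitsToHigh number width_shift out) := by unfold Spec_LongShiftBitsToHigh; infer_instance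

-- ===== CLAIM (what is proved, stated in full; the proofs are below) =====
def Claim_equal_LongShiftBitsToHigh : Prop := ∀ (number : List Int) (width_shift : Int), Dom_LongShiftBitsToHigh number width_shift → Pre_LongShiftBitsToHigh number width_shift → Spec_LongShiftBitsToHigh number width_shift (LongShiftBitsToHigh number width_shift)
-- ===== LEMMAS AND PROOFS =====


def bit31 (w : Int) : Int := w / 2147483648 % 2

def toDigits : Int → Nat → List Int
  | _, 0 => []
  | x, m + 1 => x % 4294967296 :: toDigits (x / 4294967296) m

def normVal : List Int → Int
  | [] => 0
  | w :: t => w % 4294967296 + 4294967296 * normVal t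

def shift1 : List Int → Int → List Int
  | [], _ => []
  | w :: t, p => (2 * w + bit31 p) % 4294967296 :: shift1 t w

def rep (x : Int) (m : Nat) : List Int :=
  if x / (4294967296 : Int) ^ m = 0 then toDigits x m
  else toDigits x m ++ [x / (4294967296 : Int) ^ m]

theorem nat_xor_even (m : Nat) : (2 * m) ^^^ 1 = 2 * m + 1 := by
  simpa [Nat.bit, Nat.mul_comm] using Nat.xor_bit false m true 0

theorem nat_xor_odd (m : Nat) : (2 * m + 1) ^^^ 1 = 2 * m := by
  simpa [Nat.bit, Nat.mul_comm] using Nat.xor_bit true m true 0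

theorem band_mask (x : Int) : PySem.Int.band x 4294967295 = x % 4294967296 := by
  unfold PySem.Int.band
  split
  · split
    · rename_i hx _
      rw [show (4294967295 : Int).toNat = 2 ^ 32 - 1 from by decide, Nat.and_two_pow_sub_one_eq_mod]
      omega
    · omega
  · split
    · rename_i hx _
      rw [show (4294967295 : Int).toNat = 2 ^ 32 - 1 from by decide, Nat.and_comm,
        Nat.and_two_pow_sub_one_eq_mod]
      have : ((-x - 1).toNat % 2 ^ 32) < 2 ^ 32 := Nat.mod_lt _ (by norm_num)
      omega
    · omega

theorem bxor_even (x b : Int) (hb : b = 0 ∨ b = 1) : PySem.Int.bxor (2 * x) b = 2 * x + b := by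
  rcases hb with rfl | rfl
  · simp [PySem.Int.bxor_zero]
  · unfold PySem.Int.bxor
    split
    · rw [if_pos (by omega : (0 : Int) ≤ 1),
        show (1 : Int).toNat = 1 from by decide,
        show (2 * x).toNat = 2 * x.toNat from by omega, nat_xor_even]
      omega
    · rw [if_pos (by omega : (0 : Int) ≤ 1),
        show (1 : Int).toNat = 1 from by decide,
        show (-(2 * x) - 1).toNat = 2 * (-x - 1).toNat + 1 from by omega, nat_xor_odd]
      omega

theorem band_bit (p : Int) : PySem.Int.band (p >>> (31 : Nat)) 1 = bit31 p := by
  rw [PySem.Int.band_one, PySem.Int.mod_eq_emod_of_pos (by norm_num),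
    Int.shiftRight_eq_div_pow, bit31]
  norm_num

theorem combo (w p : Int) :
    PySem.Int.band
      (PySem.Int.bxor (w <<< (1 : Nat)) (PySem.Int.band (p >>> (31 : Nat)) 1)) 4294967295
    = (2 * w + bit31 p) % 4294967296 := by
  rw [band_bit, Int.shiftLeft_eq, show ((2:Int) ^ (1:Nat)) = 2 from by norm_num, mul_comm w 2,
    bxor_even _ _ (by unfold bit31; omega), band_mask]

theorem toDigits_succ_append : ∀ (m : Nat) (x : Int),
    toDigits x (m + 1) = toDigits x m ++ [x / (4294967296 : Int) ^ m % 4294967296] := by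
  intro m
  induction m with
  | zero => intro x; simp [toDigits]
  | succ m ih =>
    intro x
    show x % 4294967296 :: toDigits (x / 4294967296) (m+1) = _
    rw [ih]
    simp only [toDigits, List.cons_append]
    rw [Int.ediv_ediv_of_nonneg (show (0:Int) ≤ 4294967296 by norm_num), ← pow_succ']

theorem map_mod_eq_toDigits : ∀ l : List Int,
    l.map (· % 4294967296) = toDigits (normVal l) l.length := by
  intro l
  induction l with
  | nil => rfl
  | cons w t ih =>
    simp only [List.map, List.length_cons, toDigits, normVal, ih]
    refine List.cons_eq_cons.mpr ⟨by omega, ?_⟩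
    congr 1
    omega

theorem replicate_append_toDigits : ∀ (k : Nat) (x : Int) (n : Nat),
    List.replicate k 0 ++ toDigits x n = toDigits (x * (4294967296 : Int) ^ k) (k + n) := by
  intro k
  induction k with
  | zero => intro x n; simp
  | succ k ih =>
    intro x n
    rw [List.replicate_succ, List.cons_append, ih]
    rw [show k + 1 + n = (k + n) + 1 from by omega]
    simp only [toDigits]
    refine List.cons_eq_cons.mpr ⟨?_, ?_⟩
    · have : (4294967296:Int) ∣ x * 4294967296 ^ (k+1) := ⟨x * 4294967296^k, by ring⟩
      omega
    · congr 1
      rw [pow_succ, ← mul_assoc, Int.mul_ediv_cancel _ (by norm_num)]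

theorem shift1_toDigits : ∀ (m : Nat) (x p : Int),
    shift1 (toDigits x m) p = toDigits (2 * x + bit31 p) m := by
  intro m
  induction m with
  | zero => intro x p; rfl
  | succ m ih =>
    intro x p
    simp only [toDigits, shift1, ih]
    refine List.cons_eq_cons.mpr ⟨by unfold bit31; omega, ?_⟩
    congr 1
    unfold bit31; omega

theorem shift1_congr : ∀ (r : List Int) (p q : Int), bit31 p = bit31 q →
    shift1 (r.map (· % 4294967296)) p = shift1 r q := by
  intro r
  induction r with
  | nil => intros; rfl
  | cons w t ih =>
    intro p q h
    simp only [List.map, shift1]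
    refine List.cons_eq_cons.mpr ⟨by rw [h]; omega, ih _ _ (by unfold bit31; omega)⟩

theorem normVal_nonneg : ∀ l : List Int, 0 ≤ normVal l := by
  intro l
  induction l with
  | nil => exact le_refl 0
  | cons w t ih => simp only [normVal]; omega

theorem normVal_lt : ∀ l : List Int, normVal l < (4294967296 : Int) ^ l.length := by
  intro l
  induction l with
  | nil => norm_num [normVal]
  | cons w t ih =>
    simp only [normVal, List.length_cons, pow_succ']
    have h1 : w % 4294967296 < 4294967296 := by omega
    have h2 : 0 ≤ w % 4294967296 := by omega
    nlinarith

theorem getLast?_cons_getLastD (a : Int) (t : List Int) :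
    (a :: t).getLast? = some (t.getLastD a) := by
  induction t generalizing a with
  | nil => rfl
  | cons b t' ih => rw [List.getLast?_cons_cons, ih b, List.getLastD_cons]

theorem shift1_append_singleton : ∀ (t : List Int) (p w : Int),
    shift1 (t ++ [w]) p
      = shift1 t p ++ [(2 * w + bit31 (t.getLastD p)) % 4294967296] := by
  intro t
  induction t with
  | nil => intro p w; simp [shift1]
  | cons a t' ih =>
    intro p w
    simp only [List.cons_append, shift1, ih a w, List.getLastD_cons]

def bodyA (rr : List Int) (j : Int) : List Int :=
  PySem.List.pySetD rr j
    ((2 * PySem.List.pyGetD rr j 0 + bit31 (PySem.List.pyGetD rr (j - 1) 0)) % 4294967296)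

theorem foldA : ∀ (r s : List Int), r ≠ [] →
    (PySem.List.pyRange ((r.length : Int) - 1) 0 (-1)).foldl bodyA (r ++ s)
    = (r.headI :: shift1 r.tail r.headI) ++ s := by
  intro r
  induction r using List.reverseRecOn with
  | nil => intro s h; exact absurd rfl h
  | append_singleton r' w ih =>
    intro s _
    rcases r' with _ | ⟨a, t⟩
    · rw [show ((([] ++ [w] : List Int)).length : Int) - 1 = 0 by simp,
        PySem.List.pyRange_neg_one_eq_nil (le_refl 0)]
      simp [shift1]
    · have hlen : (((a :: t) ++ [w]).length : Int) - 1 = ((a :: t).length : Int) := by simp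
      rw [hlen, PySem.List.pyRange_neg_one_cons (by simp), List.foldl_cons]
      have hget1 : PySem.List.pyGetD ((a :: t) ++ [w] ++ s) (((a :: t).length : Int)) 0 = w := by
        rw [List.append_assoc, PySem.List.pyGetD_natCast, List.getD_eq_getElem?_getD,
          List.getElem?_append_right (le_refl _)]
        simp
      have hget2 : PySem.List.pyGetD ((a :: t) ++ [w] ++ s) (((a :: t).length : Int) - 1) 0
          = t.getLastD a := by
        rw [show (((a :: t).length : Int) - 1) = (((a :: t).length - 1 : Nat) : Int) by
          simp, PySem.List.pyGetD_natCast, List.getD_eq_getElem?_getD, List.append_assoc,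
          List.getElem?_append_left (by simp),
          ← List.getLast?_eq_getElem?, getLast?_cons_getLastD]
        rfl
      have hset : bodyA ((a :: t) ++ [w] ++ s) ((a :: t).length : Int)
          = (a :: t) ++ ([(2 * w + bit31 (t.getLastD a)) % 4294967296] ++ s) := by
        unfold bodyA
        rw [hget1, hget2, PySem.List.pySetD_natCast, List.append_assoc,
          List.set_append_right _ _ (le_refl _)]
        simp
      rw [hset, ih _ (by simp)]
      simp only [List.cons_append, List.headI, List.tail]
      rw [shift1_append_singleton]
      simp

theorem stepA_eq (a : Int) (t : List Int) :
    pvShiftStepA (a :: t) =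
      if bit31 (t.getLastD a) ≠ 0 then shift1 (a :: t) 0 ++ [bit31 (t.getLastD a)]
      else shift1 (a :: t) 0 := by
  have hne : (a :: t) ≠ [] := by simp
  have hlast : (a :: t).getLast hne = t.getLastD a := by
    have h1 := List.getLast?_eq_some_getLast (l := a :: t) hne
    rw [getLast?_cons_getLastD] at h1
    exact (Option.some.inj h1).symm
  simp only [pvShiftStepA]
  rw [PySem.List.pyGetD_neg_one _ _ hne, hlast, band_bit]
  have hbody : (fun (r : List Int) (j : Int) => PySem.List.pySetD r j
        (PySem.Int.band
          (PySem.Int.bxor ((PySem.List.pyGetD r j 0) <<< (1 : Nat))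
            (PySem.Int.band ((PySem.List.pyGetD r (j - 1) 0) >>> (31 : Nat)) 1))
          4294967295)) = bodyA := by
    funext rr j
    rw [combo]
    rfl
  rw [hbody, PySem.List.len_eq]
  have hfold := foldA (a :: t) [] hne
  rw [List.append_nil, List.append_nil] at hfold
  rw [hfold]
  simp only [List.headI, List.tail]
  have hv : PySem.Int.band (a <<< (1:Nat)) 4294967295 = (2*a + bit31 0) % 4294967296 := by
    rw [Int.shiftLeft_eq, band_mask]
    unfold bit31
    norm_num
    ring_nf
  simp only [PySem.List.pyGetD_zero_cons]
  rw [hv]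
  have hset : PySem.List.pySetD (a :: shift1 t a) 0 ((2*a + bit31 0) % 4294967296)
      = ((2*a + bit31 0) % 4294967296) :: shift1 t a := by
    rw [show ((0:Int)) = ((0:Nat):Int) by norm_num, PySem.List.pySetD_natCast]
    rfl
  rw [hset]
  rfl

theorem getLastD_map_mod : ∀ (t : List Int) (a : Int),
    (t.map (· % 4294967296)).getLastD (a % 4294967296) = (t.getLastD a) % 4294967296 := by
  intro t
  induction t with
  | nil => intro a; rfl
  | cons b t' ih => intro a; simp only [List.map, List.getLastD_cons, ih b]

theorem stepA_norm (a : Int) (t : List Int) :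
    pvShiftStepA ((a :: t).map (· % 4294967296)) = pvShiftStepA (a :: t) := by
  have hmap : (a :: t).map (· % 4294967296) = (a % 4294967296) :: t.map (· % 4294967296) := rfl
  rw [hmap, stepA_eq, stepA_eq, getLastD_map_mod]
  have hb : bit31 (t.getLastD a % 4294967296) = bit31 (t.getLastD a) := by unfold bit31; omega
  have hs : shift1 ((a % 4294967296) :: t.map (· % 4294967296)) 0 = shift1 (a :: t) 0 := by
    have := shift1_congr (a :: t) 0 0 rfl
    exact this
  rw [hb, hs]

theorem consIter : ∀ (j : Nat) (n : List Int),
    (fun l => (0:Int) :: l)^[j] n = List.replicate j 0 ++ n := by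
  intro j
  induction j with
  | zero => intro n; rfl
  | succ j ih =>
    intro n
    rw [Function.iterate_succ_apply', ih, List.replicate_succ]
    rfl

theorem foldl_const_iterate {α β : Type} : ∀ (l : List α) (f : β → β) (a : β),
    l.foldl (fun acc _ => f acc) a = f^[l.length] a := by
  intro l
  induction l with
  | nil => intro f a; rfl
  | cons x t ih => intro f a; simp [List.foldl, ih, Function.iterate_succ_apply]

theorem LSD_eq (n : List Int) (l : Int) :
    LongShiftDigitsToHigh n l = List.replicate l.toNat 0 ++ n := by
  unfold LongShiftDigitsToHigh
  simp only [PySem.List.insert_zero]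
  rw [foldl_const_iterate _ (fun l => (0:Int) :: l), consIter,
    PySem.List.length_pyRange_one]
  norm_num

theorem foldB : ∀ (l : List Int) (e : Nat) (acc : List Int) (c : Int), 0 ≤ c →
    l.foldl
      (fun (p : List Int × Int) w =>
        let v := (PySem.Int.band w 4294967295) <<< e + p.2
        (p.1 ++ [PySem.Int.band v 4294967295], v >>> (32 : Nat)))
      (acc, c)
    = (acc ++ toDigits (normVal l * 2 ^ e + c) l.length,
       (normVal l * 2 ^ e + c) / (4294967296 : Int) ^ l.length) := by
  intro l
  induction l with
  | nil =>
    intro e acc c _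
    simp [toDigits, normVal]
  | cons w t ih =>
    intro e acc c hc
    rw [List.foldl_cons]
    have hv2 : ((PySem.Int.band w 4294967295) <<< e + c) >>> (32:Nat)
        = ((w % 4294967296) * 2 ^ e + c) / 4294967296 := by
      rw [band_mask, Int.shiftLeft_eq, Int.shiftRight_eq_div_pow]
      norm_num
    have hv1 : PySem.Int.band ((PySem.Int.band w 4294967295) <<< e + c) 4294967295
        = ((w % 4294967296) * 2 ^ e + c) % 4294967296 := by
      rw [band_mask, band_mask, Int.shiftLeft_eq]
    simp only [hv1, hv2]
    have hvnn : 0 ≤ (w % 4294967296) * 2 ^ e + c := by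
      have h1 : (0:Int) ≤ (w % 4294967296) * 2 ^ e := mul_nonneg (Int.emod_nonneg w (by norm_num)) (by positivity)
      omega
    rw [ih e (acc ++ [((w % 4294967296) * 2 ^ e + c) % 4294967296])
      (((w % 4294967296) * 2 ^ e + c) / 4294967296) (Int.ediv_nonneg hvnn (by norm_num))]
    have hX : normVal (w :: t) * 2 ^ e + c
        = ((w % 4294967296) * 2 ^ e + c) + 4294967296 * (normVal t * 2 ^ e) := by
      show (w % 4294967296 + 4294967296 * normVal t) * 2 ^ e + c = _
      ring
    set v := (w % 4294967296) * 2 ^ e + c with hvdef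
    set Y := normVal t * 2 ^ e with hY
    refine Prod.ext ?_ ?_
    · show acc ++ [v % 4294967296] ++ toDigits (Y + v / 4294967296) t.length
        = acc ++ toDigits (normVal (w :: t) * 2 ^ e + c) (w :: t).length
      rw [hX]
      show _ = acc ++ ((v + 4294967296 * Y) % 4294967296
          :: toDigits ((v + 4294967296 * Y) / 4294967296) t.length)
      rw [List.append_assoc]
      congr 1
      rw [show (v + 4294967296 * Y) % 4294967296 = v % 4294967296 from by omega,
        show (v + 4294967296 * Y) / 4294967296 = Y + v / 4294967296 from by omega]
      rfl
    · show (Y + v / 4294967296) / (4294967296:Int) ^ t.length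
        = (normVal (w :: t) * 2 ^ e + c) / (4294967296:Int) ^ (w :: t).length
      rw [hX, show ((w :: t).length) = t.length + 1 from rfl, pow_succ',
        ← Int.ediv_ediv_of_nonneg (show (0:Int) ≤ 4294967296 by norm_num),
        show (v + 4294967296 * Y) / 4294967296 = Y + v / 4294967296 from by omega]

theorem popZeros : ∀ j : Nat, popTrailingZeros (List.replicate j 0 ++ [0]) = [0] := by
  intro j
  induction j with
  | zero => decide
  | succ j ih =>
    have hlen : (List.replicate (j+1) (0:Int) ++ [0]).length = j + 2 := by simp
    unfold popTrailingZeros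
    rw [hlen]
    show popAux (j + 2) _ = [0]
    unfold popAux
    rw [if_pos ⟨by simp, by rw [PySem.List.pyGet?_neg_one, List.getLast?_concat]⟩]
    have hdrop : (List.replicate (j+1) (0:Int) ++ [0]).dropLast = List.replicate j 0 ++ [0] := by
      rw [List.dropLast_concat]
      rw [show (j + 1) = j + 1 from rfl, List.replicate_succ']
    rw [hdrop]
    have hlen2 : (List.replicate j (0:Int) ++ [0]).length = j + 1 := by simp
    unfold popTrailingZeros at ih
    rw [hlen2] at ih
    exact ih

theorem toDigits_length : ∀ (m : Nat) (x : Int), (toDigits x m).length = m := by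
  intro m
  induction m with
  | zero => intro x; rfl
  | succ m ih => intro x; simp only [toDigits, List.length_cons, ih]

theorem getLastD_toDigits (m : Nat) (x d : Int) :
    (toDigits x (m+1)).getLastD d = x / (4294967296 : Int) ^ m % 4294967296 := by
  rw [toDigits_succ_append, List.getLastD_concat]

theorem toDigits_cons_decomp (m : Nat) (x : Int) :
    ∃ a t, toDigits x (m+1) = a :: t ∧ t.getLastD a = x / (4294967296 : Int) ^ m % 4294967296 := by
  rcases h : toDigits x (m+1) with _ | ⟨a, t⟩
  · exfalso
    have h2 := toDigits_length (m+1) x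
    rw [h] at h2
    simp at h2
  · refine ⟨a, t, rfl, ?_⟩
    have h3 := getLastD_toDigits m x a
    rw [h, List.getLastD_cons] at h3
    exact h3

theorem step_rep (x : Int) (m : Nat) (hm : 1 ≤ m) (hx : 0 ≤ x)
    (hlt : x < (4294967296 : Int) ^ m * 2 ^ 30) :
    pvShiftStepA (rep x m) = rep (2 * x) m := by
  obtain ⟨m', rfl⟩ : ∃ m', m = m' + 1 := ⟨m - 1, by omega⟩
  have hMpos : (0:Int) < (4294967296:Int) := by norm_num
  have hQpos : (0:Int) < (4294967296:Int) ^ m' := by positivity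
  have hPpos : (0:Int) < (4294967296:Int) ^ (m'+1) := by positivity
  have hPQ' : (4294967296:Int) ^ (m'+1) = (4294967296:Int) ^ m' * 4294967296 := by rw [pow_succ]
  by_cases hq : x / (4294967296:Int) ^ (m'+1) = 0
  · -- x < M^(m+1)
    have hxP : x < (4294967296:Int) ^ (m'+1) := by
      by_contra h
      have h1 : 1 ≤ x / (4294967296:Int) ^ (m'+1) := by
        rw [Int.le_ediv_iff_mul_le hPpos]; omega
      omega
    have hrep : rep x (m'+1) = toDigits x (m'+1) := by rw [rep, if_pos hq]
    obtain ⟨a, t, hco, hlast⟩ := toDigits_cons_decomp m' x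
    -- g = x / M^m' % M = x / M^m' since x < M^(m'+1)
    have hqlt : x / (4294967296:Int) ^ m' < 4294967296 := by
      rw [Int.ediv_lt_iff_lt_mul hQpos]; rw [hPQ'] at hxP; linarith
    have hqnn : 0 ≤ x / (4294967296:Int) ^ m' := Int.ediv_nonneg hx (le_of_lt hQpos)
    have hg : t.getLastD a = x / (4294967296:Int) ^ m' := by rw [hlast]; omega
    -- bit31 of g
    have hRint : x / (4294967296:Int) ^ m' / 2147483648 = x / ((4294967296:Int) ^ m' * 2147483648) :=
      Int.ediv_ediv_of_nonneg (le_of_lt hQpos)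
    have hxR : x / ((4294967296:Int) ^ m' * 2147483648) < 2 := by
      rw [Int.ediv_lt_iff_lt_mul (by positivity)]
      calc x < (4294967296:Int) ^ (m'+1) := hxP
        _ ≤ 2 * ((4294967296:Int) ^ m' * 2147483648) := by rw [hPQ']; nlinarith
    have hxRnn : 0 ≤ x / ((4294967296:Int) ^ m' * 2147483648) := Int.ediv_nonneg hx (by positivity)
    have hbit : bit31 (t.getLastD a) = x / ((4294967296:Int) ^ m' * 2147483648) := by
      rw [hg, bit31, hRint]; omega
    rw [hrep, hco, stepA_eq, ← hco, shift1_toDigits]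
    have hb0 : (2 * x + bit31 0) = 2 * x := by rw [bit31]; norm_num
    rw [hb0]
    by_cases hbig : 2 * x < (4294967296:Int) ^ (m'+1)
    · have hz : x / ((4294967296:Int) ^ m' * 2147483648) = 0 := by
        have : x < (4294967296:Int) ^ m' * 2147483648 := by rw [hPQ'] at hbig; nlinarith
        exact Int.ediv_eq_zero_of_lt hx this
      rw [hbit, hz]
      have : rep (2*x) (m'+1) = toDigits (2*x) (m'+1) := by
        rw [rep, if_pos (Int.ediv_eq_zero_of_lt (by omega) hbig)]
      rw [this]
      simp
    · have ho : x / ((4294967296:Int) ^ m' * 2147483648) = 1 := by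
        have h1 : 1 ≤ x / ((4294967296:Int) ^ m' * 2147483648) := by
          rw [Int.le_ediv_iff_mul_le (by positivity)]
          rw [hPQ'] at hbig; nlinarith
        omega
      have hdv : 2 * x / (4294967296:Int) ^ (m'+1) = 1 := by
        have h1 : 1 ≤ 2 * x / (4294967296:Int) ^ (m'+1) := by
          rw [Int.le_ediv_iff_mul_le hPpos]; omega
        have h2 : 2 * x / (4294967296:Int) ^ (m'+1) < 2 := by
          rw [Int.ediv_lt_iff_lt_mul hPpos]; omega
        omega
      rw [hbit, ho]
      have : rep (2*x) (m'+1) = toDigits (2*x) (m'+1) ++ [1] := by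
        rw [rep, if_neg (by rw [hdv]; norm_num), hdv]
      rw [this]
      simp
  · -- x ≥ M^(m'+1)
    have hq0nn : 0 ≤ x / (4294967296:Int) ^ (m'+1) := Int.ediv_nonneg hx (le_of_lt hPpos)
    have hq0lt : x / (4294967296:Int) ^ (m'+1) < 2 ^ 30 := by
      rw [Int.ediv_lt_iff_lt_mul hPpos]; linarith [hlt]
    have hrep : rep x (m'+1) = toDigits x (m'+1+1) := by
      rw [rep, if_neg hq]
      conv_rhs => rw [toDigits_succ_append (m'+1) x]
      rw [show x / (4294967296:Int) ^ (m'+1) % 4294967296 = x / (4294967296:Int) ^ (m'+1) from by omega]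
    obtain ⟨a, t, hco, hlast⟩ := toDigits_cons_decomp (m'+1) x
    have hg : t.getLastD a = x / (4294967296:Int) ^ (m'+1) := by rw [hlast]; omega
    have hbit : bit31 (t.getLastD a) = 0 := by
      rw [hg, bit31]
      have h5 : x / (4294967296:Int) ^ (m'+1) / 2147483648 = 0 := Int.ediv_eq_zero_of_lt hq0nn (by omega)
      rw [h5]
      decide
    rw [hrep, hco, stepA_eq, hbit, if_neg (by norm_num), ← hco, shift1_toDigits]
    have hb0 : (2 * x + bit31 0) = 2 * x := by rw [bit31]; norm_num
    rw [hb0, toDigits_succ_append]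
    have hdnn : 1 ≤ 2 * x / (4294967296:Int) ^ (m'+1) := by
      rw [Int.le_ediv_iff_mul_le hPpos]
      have h1 : (4294967296:Int) ^ (m'+1) ≤ x := by
        by_contra h
        exact hq (Int.ediv_eq_zero_of_lt hx (by omega))
      omega
    have hdlt : 2 * x / (4294967296:Int) ^ (m'+1) < 2 ^ 31 := by
      rw [Int.ediv_lt_iff_lt_mul hPpos]
      nlinarith
    rw [rep, if_neg (by omega)]
    congr 2
    omega

theorem iter_rep : ∀ (t : Nat) (x : Int) (m : Nat), 1 ≤ m → 0 ≤ x → t ≤ 31 →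
    x < (4294967296 : Int) ^ m * 2 ^ (31 - t) →
    pvShiftStepA^[t] (rep x m) = rep (x * 2 ^ t) m := by
  intro t
  induction t with
  | zero => intro x m _ _ _ _; simp
  | succ t ih =>
    intro x m hm hx ht hlt
    rw [Function.iterate_succ_apply]
    have h30 : x < (4294967296 : Int) ^ m * 2 ^ 30 := by
      calc x < (4294967296 : Int) ^ m * 2 ^ (31 - (t+1)) := hlt
        _ ≤ (4294967296 : Int) ^ m * 2 ^ 30 := by
          apply mul_le_mul_of_nonneg_left _ (by positivity)
          exact pow_le_pow_right₀ (by norm_num) (by omega)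
    rw [step_rep x m hm hx h30]
    have h2 : 2 * x < (4294967296 : Int) ^ m * 2 ^ (31 - t) := by
      have : (31 - t) = (31 - (t+1)) + 1 := by omega
      rw [this, pow_succ]
      linarith
    rw [ih (2*x) m hm (by omega) (by omega) h2]
    congr 1
    rw [pow_succ]
    ring

theorem main_eq : ∀ (number : List Int) (width_shift : Int),
    Pre_LongShiftBitsToHigh number width_shift →
    LongShiftBitsToHigh number width_shift = LongShiftBitsToHigh_alt number width_shift := by
  intro number ws hp
  by_cases h0 : ws ≤ 0
  · simp only [LongShiftBitsToHigh, LongShiftBitsToHigh_alt]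
    rw [if_pos (Or.inl h0), if_pos h0]
  · have hws : 0 < ws := by omega
    have hmod : PySem.Int.mod ws 32 = ws % 32 := PySem.Int.mod_eq_emod_of_pos (by norm_num)
    have hdiv : PySem.Int.floordiv ws 32 = ws / 32 := PySem.Int.floordiv_eq_ediv_of_pos (by norm_num)
    have hknn : 0 ≤ ws / 32 := Int.ediv_nonneg (by omega) (by norm_num)
    have hremnn : 0 ≤ ws % 32 := by omega
    have hremlt : ws % 32 < 32 := by omega
    simp only [LongShiftBitsToHigh, LongShiftBitsToHigh_alt, hmod, hdiv, if_neg h0]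
    by_cases h1 : number = [0]
    · subst h1
      rw [if_pos (Or.inr rfl)]
      by_cases hr : ws % 32 = 0
      · rw [if_pos hr, popZeros]
      · rw [if_neg hr]
        rw [foldB [0] (ws % 32).toNat (List.replicate (ws / 32).toNat 0) 0 (le_refl 0)]
        have hnv : normVal [0] = 0 := by simp [normVal]
        simp only [hnv, List.length_cons, List.length_nil, zero_mul, zero_add,
          Int.zero_ediv, ne_eq, not_true_eq_false, if_false]
        rw [show toDigits 0 1 = [0] from rfl, popZeros]
    · rw [if_neg (by intro hc; rcases hc with hc | hc; exact h0 hc; exact h1 hc)]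
      by_cases hr : ws % 32 = 0
      · rw [if_neg (by omega), if_pos hr, LSD_eq]
      · rw [if_pos (by omega), if_neg hr]
        -- names
        obtain ⟨e, hge⟩ : ∃ x : Nat, (ws % 32).toNat = x := ⟨_, rfl⟩
        have he1 : 1 ≤ e := by omega
        have he31 : e ≤ 31 := by omega
        rw [hge]
        set k : Nat := (ws / 32).toNat with hk
        set n : Nat := number.length with hn
        set V : Int := normVal number with hV
        have hm1 : 1 ≤ k + n := by
          rcases hp with hne | hle | h32
          · have : 0 < n := by
              rw [hn]
              exact List.length_pos_iff.mpr hne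
            omega
          · omega
          · have : 1 ≤ ws / 32 := by
              rw [Int.le_ediv_iff_mul_le (by norm_num)]; omega
            omega
        have hVnn : 0 ≤ V := normVal_nonneg number
        have hVlt : V < (4294967296:Int) ^ n := normVal_lt number
        have hMk : (0:Int) < 4294967296 ^ k := by positivity
        have hMn : (0:Int) < 4294967296 ^ n := by positivity
        have hMm : (0:Int) < 4294967296 ^ (k + n) := by positivity
        have hpowadd : (4294967296:Int) ^ (k + n) = 4294967296 ^ k * 4294967296 ^ n := pow_add _ _ _
        have hX0lt : V * 4294967296 ^ k < 4294967296 ^ (k + n) := by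
          rw [hpowadd, mul_comm ((4294967296:Int) ^ k)]
          exact mul_lt_mul_of_pos_right hVlt hMk
        have hX0nn : 0 ≤ V * (4294967296:Int) ^ k := mul_nonneg hVnn (le_of_lt hMk)
        -- A side
        rw [LSD_eq, foldl_const_iterate _ pvShiftStepA, PySem.List.length_pyRange_one]
        rw [show ((ws % 32 - 0).toNat) = e from by omega]
        obtain ⟨e', rfl⟩ : ∃ e', e = e' + 1 := ⟨e - 1, by omega⟩
        rw [Function.iterate_succ_apply]
        have hr0 : List.replicate k (0:Int) ++ number ≠ [] := by
          have : (List.replicate k (0:Int) ++ number).length = k + n := by simp [hn]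
          intro hnil
          rw [hnil] at this
          simp at this
          omega
        obtain ⟨a, t, hco⟩ : ∃ a t, List.replicate k (0:Int) ++ number = a :: t := by
          rcases hl : List.replicate k (0:Int) ++ number with _ | ⟨a, t⟩
          · exact absurd hl hr0
          · exact ⟨a, t, rfl⟩
        have hnormed : (List.replicate k (0:Int) ++ number).map (· % 4294967296)
            = toDigits (V * 4294967296 ^ k) (k + n) := by
          rw [List.map_append, List.map_replicate, show ((0:Int) % 4294967296) = 0 from rfl,
            hV, hn, map_mod_eq_toDigits, replicate_append_toDigits]
        have hstep1 : pvShiftStepA (List.replicate k (0:Int) ++ number)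
            = pvShiftStepA (toDigits (V * 4294967296 ^ k) (k + n)) := by
          rw [hco, ← stepA_norm, ← hco, hnormed]
        rw [hstep1]
        have hrepX0 : toDigits (V * 4294967296 ^ k) (k + n) = rep (V * 4294967296 ^ k) (k + n) := by
          rw [rep, if_pos (Int.ediv_eq_zero_of_lt hX0nn hX0lt)]
        rw [hrepX0]
        rw [step_rep _ _ hm1 hX0nn (by nlinarith)]
        rw [iter_rep e' _ _ hm1 (by omega) (by omega) (by
          have h2e : (2:Int) ≤ 2 ^ (31 - e') := by
            calc (2:Int) = 2 ^ 1 := by norm_num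
            _ ≤ 2 ^ (31 - e') := pow_le_pow_right₀ (by norm_num) (by omega)
          calc 2 * (V * 4294967296 ^ k) < 2 * 4294967296 ^ (k + n) := by omega
          _ ≤ 4294967296 ^ (k + n) * 2 ^ (31 - e') := by nlinarith)]
        -- B side
        rw [foldB number (e' + 1) (List.replicate k 0) 0 (le_refl 0)]
        congr 1
        have hXnn : 0 ≤ V * 2 ^ (e' + 1) := mul_nonneg hVnn (by positivity)
        have hcar : (V * 2 ^ (e' + 1) * 4294967296 ^ k) / (4294967296:Int) ^ (k + n)
            = (V * 2 ^ (e' + 1)) / 4294967296 ^ n := by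
          rw [mul_comm (V * 2 ^ (e' + 1)), hpowadd,
            Int.mul_ediv_mul_of_pos _ _ hMk]
        rw [rep]
        simp only [add_zero, ← hV, ← hn]
        rw [show List.replicate k (0:Int) ++ toDigits (V * 2 ^ (e' + 1)) n
            = toDigits (V * 2 ^ (e' + 1) * 4294967296 ^ k) (k + n) from
          replicate_append_toDigits k _ n]
        rw [show 2 * (V * 4294967296 ^ k) * 2 ^ e' = V * 2 ^ (e' + 1) * 4294967296 ^ k from by
          rw [pow_succ]; ring]
        rw [hcar]
        by_cases hcz : (V * 2 ^ (e' + 1)) / (4294967296:Int) ^ n = 0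
        · rw [if_pos hcz, if_neg (by omega)]
        · rw [if_neg hcz, if_pos hcz]

-- ===== VERDICT (by name: the statement is the Claim_ definition above) =====
theorem LongShiftBitsToHigh_spec : Claim_equal_LongShiftBitsToHigh := by
  intro number width_shift _hd hp
  unfold Spec_LongShiftBitsToHigh
  exact main_eq number width_shift hp
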